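-- pv_equiv track=rewrite | github.com/CyrusSE/CTF-Writeups | CCP/Warmup/Orteganol.py | solve
-- ===== SOURCE A (Python) =====
-- def check_orteganol(freq):
--     freqs = [f for f in freq.values() if f > 0]
--     return len(freqs) > 0 and len(set(freqs)) == 1
--
-- def solve(N, A, B, S):
--     count = 0
--     for len_window in range(A, B + 1):
--         freq = {}
--         for i in range(len_window):
--             freq[S[i]] = freq.get(S[i], 0) + 1
--         if check_orteganol(freq):
--             count += 1
--         for i in range(len_window, N):
--             freq[S[i - len_window]] -= 1
--             freq[S[i]] = freq.get(S[i], 0) + 1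
--             if check_orteganol(freq):
--                 count += 1
--
--     return count
-- ===== SOURCE B (Python) =====
-- def _shift(cnt, fof, distinct, c, delta):
--     # move char c's frequency by delta, keeping fof = frequency-of-frequencies
--     # and distinct = number of distinct positive frequencies
--     old = cnt.get(c, 0)
--     new = old + delta
--     cnt[c] = new
--     if old > 0:
--         fof[old] = fof.get(old, 0) - 1
--         if fof[old] == 0:
--             distinct -= 1
--     if new > 0:
--         if fof.get(new, 0) == 0:
--             distinct += 1
--         fof[new] = fof.get(new, 0) + 1
--     return distinct
--
-- def solve(N, A, B, S):
--     count = 0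
--     for lw in range(A, B + 1):
--         cnt = {}
--         fof = {}
--         distinct = 0
--         for i in range(lw):
--             distinct = _shift(cnt, fof, distinct, S[i], 1)
--         if distinct == 1:
--             count += 1
--         for i in range(lw, N):
--             distinct = _shift(cnt, fof, distinct, S[i - lw], -1)
--             distinct = _shift(cnt, fof, distinct, S[i], 1)
--             if distinct == 1:
--                 count += 1
--     return count
-- ===== Notes on version B (the rewrite author's own statement) =====
-- stated objective: alternative
-- what changed: Instead of rebuilding the positive-frequency list and its set from the dict after every window shift, B incrementally maintains a frequency-of-frequencies table together with a running count of distinct positive frequencies and tests that count against 1.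
import Mathlib
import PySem

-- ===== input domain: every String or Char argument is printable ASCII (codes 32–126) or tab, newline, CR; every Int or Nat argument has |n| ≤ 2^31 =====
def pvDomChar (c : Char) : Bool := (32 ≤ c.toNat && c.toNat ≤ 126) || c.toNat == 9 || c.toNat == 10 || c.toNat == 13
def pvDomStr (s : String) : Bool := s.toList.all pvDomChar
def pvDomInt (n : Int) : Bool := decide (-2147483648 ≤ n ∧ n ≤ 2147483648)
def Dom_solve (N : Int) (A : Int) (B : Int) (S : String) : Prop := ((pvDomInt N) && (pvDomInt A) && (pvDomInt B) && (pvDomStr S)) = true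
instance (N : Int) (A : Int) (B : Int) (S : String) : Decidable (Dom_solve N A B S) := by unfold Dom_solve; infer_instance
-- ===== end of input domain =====

-- B replaces A's per-shift rebuild of the positive-frequency list and its set by an incrementally
-- maintained frequency-of-frequencies table with a running count of distinct positive frequencies,
-- tested against 1 at each shift; return values agree on all of Pre_solve.

-- ===== PORT A =====
def checkOrteganol (freq : PySem.Dict Char Int) : Bool :=
  let freqs := freq.values.filter (fun f => decide (0 < f))
  decide (0 < freqs.length) && decide ((PySem.Set.ofList freqs).length = 1)

def aStep1 (cs : List Char) (freq : PySem.Dict Char Int) (i : Int) : PySem.Dict Char Int :=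
  let c := PySem.List.pyGetD cs i ' '
  freq.insert c (freq.getD c 0 + 1)

def aStep2 (cs : List Char) (lw : Int) (st : PySem.Dict Char Int × Int) (i : Int) :
    PySem.Dict Char Int × Int :=
  let c0 := PySem.List.pyGetD cs (i - lw) ' '
  let freq := st.1.insert c0 (st.1.getD c0 0 - 1)
  let c1 := PySem.List.pyGetD cs i ' '
  let freq := freq.insert c1 (freq.getD c1 0 + 1)
  (freq, if checkOrteganol freq then st.2 + 1 else st.2)
-- ===== PORT B =====
def pvShift (cnt : PySem.Dict Char Int) (fof : PySem.Dict Int Int) (distinct : Int)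
    (c : Char) (delta : Int) : PySem.Dict Char Int × PySem.Dict Int Int × Int :=
  let old := cnt.getD c 0
  let new := old + delta
  let cnt := cnt.insert c new
  let st :=
    if 0 < old then
      let fof := fof.insert old (fof.getD old 0 - 1)
      (fof, if fof.getD old 0 = 0 then distinct - 1 else distinct)
    else (fof, distinct)
  if 0 < new then
    (cnt, st.1.insert new (st.1.getD new 0 + 1),
      if st.1.getD new 0 = 0 then st.2 + 1 else st.2)
  else (cnt, st.1, st.2)

-- explicit branch-form of pvShift, used only by the proofs

def bStep1 (cs : List Char) (st : PySem.Dict Char Int × PySem.Dict Int Int × Int) (i : Int) :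
    PySem.Dict Char Int × PySem.Dict Int Int × Int :=
  pvShift st.1 st.2.1 st.2.2 (PySem.List.pyGetD cs i ' ') 1

def bStep2 (cs : List Char) (lw : Int)
    (p : (PySem.Dict Char Int × PySem.Dict Int Int × Int) × Int) (i : Int) :
    (PySem.Dict Char Int × PySem.Dict Int Int × Int) × Int :=
  let st := pvShift p.1.1 p.1.2.1 p.1.2.2 (PySem.List.pyGetD cs (i - lw) ' ') (-1)
  let st := pvShift st.1 st.2.1 st.2.2 (PySem.List.pyGetD cs i ' ') 1
  (st, if st.2.2 = 1 then p.2 + 1 else p.2)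
def solve (N : Int) (A : Int) (B : Int) (S : String) : Int :=
  let cs := S.toList
  (PySem.List.pyRange A (B + 1)).foldl (fun count lw =>
    let freq := (PySem.List.pyRange 0 lw).foldl (aStep1 cs) PySem.Dict.empty
    let count := if checkOrteganol freq then count + 1 else count
    ((PySem.List.pyRange lw N).foldl (aStep2 cs lw) (freq, count)).2) 0

-- (solve's outer fold over range(A, B+1); inner loops are aStep1/aStep2, mirroring A's code.
--  S[i] is ported with pyGetD and freq[S[i-lw]] -= 1 with getD: inside Pre_solve every index is
--  in range and every decremented key is present, so both are exact there.)

def solve_alt (N : Int) (A : Int) (B : Int) (S : String) : Int :=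
  let cs := S.toList
  (PySem.List.pyRange A (B + 1)).foldl (fun count lw =>
    let st := (PySem.List.pyRange 0 lw).foldl (bStep1 cs)
      (PySem.Dict.empty, PySem.Dict.empty, 0)
    let count := if st.2.2 = 1 then count + 1 else count
    ((PySem.List.pyRange lw N).foldl (bStep2 cs lw) (st, count)).2) 0

-- ===== PRECONDITION & SPEC =====
-- Exactly the inputs on which the Python A returns normally: an out-of-range index raises
-- IndexError (window length or N beyond len(S)), and a window length <= 0 whose slide loop is
-- non-empty hits a KeyError on the empty dict.
def Pre_solve (N : Int) (A : Int) (B : Int) (S : String) : Prop :=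
  A ≤ B →
    ((A ≤ 0 → N ≤ A) ∧
     (1 ≤ B → (B ≤ (S.toList.length : Int) ∧ (N ≤ (S.toList.length : Int) ∨ N ≤ max A 1))))
instance (N : Int) (A : Int) (B : Int) (S : String) : Decidable (Pre_solve N A B S) := by
  unfold Pre_solve; infer_instance
def pvWitness_solve : Int × Int × Int × String := (6, 1, 3, "aababb")
def Spec_solve (N : Int) (A : Int) (B : Int) (S : String) (out : Int) : Prop := out = solve_alt N A B S
instance (N : Int) (A : Int) (B : Int) (S : String) (out : Int) : Decidable (Spec_solve N A B S out) := by unfold Spec_solve; infer_instance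

-- ===== CLAIM (what is proved, stated in full; the proofs are below) =====
def Claim_equal_solve : Prop := ∀ (N : Int) (A : Int) (B : Int) (S : String), Dom_solve N A B S → Pre_solve N A B S → Spec_solve N A B S (solve N A B S)

-- ===== LEMMAS AND PROOFS =====

lemma pvLen_setOfList (l : List Int) : (PySem.Set.ofList l).length = l.toFinset.card := by
  have hnd := PySem.Set.nodup_ofList l
  have hmem : (PySem.Set.ofList l).toFinset = l.toFinset := by
    ext x
    simp [List.mem_toFinset, PySem.Set.mem_ofList]
  rw [← List.toFinset_card_of_nodup hnd, hmem]

def pvPos (d : PySem.Dict Char Int) : List Int := d.values.filter (fun f => decide (0 < f))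

lemma pvMem_pos (d : PySem.Dict Char Int) (f : Int) :
    f ∈ (pvPos d).toFinset ↔ 0 < f ∧ 0 < d.values.count f := by
  simp [pvPos, List.mem_toFinset, List.count_pos_iff, and_comm]

lemma pvCount_getD_pos (d : PySem.Dict Char Int) (c : Char) (h : d.getD c 0 ≠ 0) :
    0 < d.values.count (d.getD c 0) := by
  rw [List.count_pos_iff]
  rcases hg : d.get? c with _ | v
  · rw [PySem.Dict.getD_eq_get?_getD, hg] at h; simp at h
  · have := PySem.Dict.mem_items_of_get?_eq_some d hg
    rw [PySem.Dict.getD_eq_get?_getD, hg]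
    have : v ∈ d.items.map (·.2) := List.mem_map_of_mem this
    simpa [PySem.Dict.values] using this

lemma pvCheck_unfold (d : PySem.Dict Char Int) :
    checkOrteganol d
      = (decide (0 < (pvPos d).length) && decide ((PySem.Set.ofList (pvPos d)).length = 1)) := rfl

lemma pvCheck_eq (d : PySem.Dict Char Int) :
    checkOrteganol d = decide (((pvPos d).toFinset.card : Int) = 1) := by
  rw [pvCheck_unfold, pvLen_setOfList]
  rw [← Bool.decide_and, decide_eq_decide]
  constructor
  · rintro ⟨-, h⟩; exact_mod_cast h
  · intro h
    have hc : (pvPos d).toFinset.card = 1 := by exact_mod_cast h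
    refine ⟨?_, hc⟩
    rcases Finset.card_eq_one.mp hc with ⟨x, hx⟩
    have : x ∈ (pvPos d).toFinset := by simp [hx]
    exact List.length_pos_of_mem (List.mem_toFinset.mp this)

lemma pvCountP_update {α : Type} (c : α) (p q : α → Bool) :
    ∀ (l : List α), l.Nodup → c ∈ l → (∀ x ∈ l, x ≠ c → p x = q x) →
    (l.countP q : Int) = (l.countP p : Int)
      + (if q c then 1 else 0) - (if p c then 1 else 0) := by
  intro l
  induction l with
  | nil => simp
  | cons a t ih =>
    intro hnd hc hagree
    have hnd' := List.nodup_cons.mp hnd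
    by_cases hac : a = c
    · subst hac
      have ht : t.countP p = t.countP q := List.countP_congr (fun x hx => by
        rw [hagree x (List.mem_cons_of_mem _ hx) (fun h => hnd'.1 (h ▸ hx))])
      simp only [List.countP_cons, ht]
      push_cast
      split_ifs <;> omega
    · have hct : c ∈ t := by
        rcases List.mem_cons.mp hc with h | h
        · exact absurd h.symm hac
        · exact h
      have ha : p a = q a := hagree a List.mem_cons_self hac
      have hrec := ih hnd'.2 hct (fun x hx hxc => hagree x (List.mem_cons_of_mem _ hx) hxc)
      simp only [List.countP_cons, ha]
      push_cast
      push_cast at hrec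
      split_ifs at hrec ⊢ <;> omega

lemma pvCount_map_eq (l : List Char) (g : Char → Int) (f : Int) :
    (l.map g).count f = l.countP (fun k => decide (g k = f)) := by
  rw [List.count_eq_countP, List.countP_map]; rfl

lemma pvCount_insert (d : PySem.Dict Char Int) (c : Char) (v f : Int)
    (hnd : d.keys.Nodup) (hf : f ≠ 0) :
    ((d.insert c v).values.count f : Int) = (d.values.count f : Int)
      + (if v = f then 1 else 0) - (if d.getD c 0 = f then 1 else 0) := by
  have hnd' : (d.insert c v).keys.Nodup := PySem.Dict.nodup_keys_insert d c v hnd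
  rw [PySem.Dict.values_eq_map_keys d hnd 0,
      PySem.Dict.values_eq_map_keys (d.insert c v) hnd' 0,
      pvCount_map_eq, pvCount_map_eq]
  by_cases hc : d.contains c
  · rw [PySem.Dict.keys_insert_of_contains d v hc]
    have hmem : c ∈ d.keys := (PySem.Dict.contains_iff_mem_keys d c).mp hc
    have hupd := pvCountP_update c
      (fun k => decide (d.getD k 0 = f))
      (fun k => decide ((d.insert c v).getD k 0 = f))
      d.keys hnd hmem
      (fun x _ hx => by simp [PySem.Dict.getD_insert, hx])
    rw [hupd]
    simp
  · rw [PySem.Dict.keys_insert_of_not_contains d v (by simpa using hc)]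
    rw [List.countP_append]
    have hagree : d.keys.countP (fun k => decide ((d.insert c v).getD k 0 = f))
        = d.keys.countP (fun k => decide (d.getD k 0 = f)) := by
      apply List.countP_congr
      intro x hx
      have hxc : x ≠ c := by
        intro h; subst h
        exact hc ((PySem.Dict.contains_iff_mem_keys d x).mpr hx)
      simp [PySem.Dict.getD_insert, hxc]
    have h0 : d.getD c 0 = 0 := PySem.Dict.getD_of_not_contains d 0 (by simpa using hc)
    rw [hagree, h0]
    have hcv : (fun k => decide ((d.insert c v).getD k 0 = f)) c = decide (v = f) := by
      simp
    simp only [List.countP_cons, List.countP_nil, hcv, decide_eq_true_eq,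
      if_neg (fun h : (0:Int) = f => hf h.symm)]
    push_cast
    split_ifs <;> omega


def pvInv (cnt : PySem.Dict Char Int) (fof : PySem.Dict Int Int) (distinct : Int) : Prop :=
  cnt.keys.Nodup ∧
  (∀ f : Int, 0 < f → fof.getD f 0 = (cnt.values.count f : Int)) ∧
  distinct = ((pvPos cnt).toFinset.card : Int)

def pvFof1 (fof : PySem.Dict Int Int) (old : Int) : PySem.Dict Int Int :=
  if 0 < old then fof.insert old (fof.getD old 0 - 1) else fof
def pvDist1 (fof : PySem.Dict Int Int) (distinct old : Int) : Int :=
  if 0 < old ∧ fof.getD old 0 - 1 = 0 then distinct - 1 else distinct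
def pvFof2 (fof : PySem.Dict Int Int) (old new : Int) : PySem.Dict Int Int :=
  if 0 < new then (pvFof1 fof old).insert new ((pvFof1 fof old).getD new 0 + 1) else pvFof1 fof old
def pvDist2 (fof : PySem.Dict Int Int) (distinct old new : Int) : Int :=
  if 0 < new ∧ (pvFof1 fof old).getD new 0 = 0 then pvDist1 fof distinct old + 1
  else pvDist1 fof distinct old

lemma pvShift_eq (cnt : PySem.Dict Char Int) (fof : PySem.Dict Int Int) (distinct : Int)
    (c : Char) (delta : Int) :
    pvShift cnt fof distinct c delta =
      (cnt.insert c (cnt.getD c 0 + delta),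
       pvFof2 fof (cnt.getD c 0) (cnt.getD c 0 + delta),
       pvDist2 fof distinct (cnt.getD c 0) (cnt.getD c 0 + delta)) := by
  unfold pvShift pvFof2 pvDist2 pvFof1 pvDist1
  by_cases h1 : 0 < cnt.getD c 0 <;>
    by_cases h2 : 0 < cnt.getD c 0 + delta <;>
      simp [h1, h2, PySem.Dict.getD_insert_self]

lemma pvShift_spec (cnt : PySem.Dict Char Int) (fof : PySem.Dict Int Int) (distinct : Int)
    (c : Char) (delta : Int) (hdel : delta = 1 ∨ delta = -1)
    (h : pvInv cnt fof distinct) :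
    (pvShift cnt fof distinct c delta).1 = cnt.insert c (cnt.getD c 0 + delta) ∧
    pvInv (pvShift cnt fof distinct c delta).1 (pvShift cnt fof distinct c delta).2.1
      (pvShift cnt fof distinct c delta).2.2 := by
  obtain ⟨hnd, hfof, hdist⟩ := h
  rw [pvShift_eq]
  obtain ⟨old, hold_def⟩ : ∃ o, cnt.getD c 0 = o := ⟨_, rfl⟩
  rw [hold_def]
  obtain ⟨new, hnew_def⟩ : ∃ o, old + delta = o := ⟨_, rfl⟩
  rw [hnew_def]
  have hne : new ≠ old := by omega
  have hnd' : (cnt.insert c new).keys.Nodup := PySem.Dict.nodup_keys_insert _ _ _ hnd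
  have hcount : ∀ f : Int, f ≠ 0 → ((cnt.insert c new).values.count f : Int)
      = (cnt.values.count f : Int) + (if new = f then 1 else 0) - (if old = f then 1 else 0) := by
    intro f hf
    have := pvCount_insert cnt c new f hnd hf
    rwa [hold_def] at this
  have holdpos : 0 < old → 0 < cnt.values.count old := by
    intro h
    have := pvCount_getD_pos cnt c (by omega)
    rwa [hold_def] at this
  have hmem' : ∀ f : Int, f ∈ (pvPos (cnt.insert c new)).toFinset ↔
      ((f ∈ (pvPos cnt).toFinset ∧ ¬(f = old ∧ (cnt.values.count old : Int) = 1))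
        ∨ (f = new ∧ 0 < new)) := by
    intro f
    by_cases hf0 : f = 0
    · subst hf0
      rw [pvMem_pos, pvMem_pos]
      omega
    · have hc := hcount f hf0
      by_cases hfo : f = old
      · subst hfo
        rw [pvMem_pos, pvMem_pos]
        split_ifs at hc <;> omega
      · rw [pvMem_pos, pvMem_pos]
        split_ifs at hc <;> omega
  refine ⟨rfl, hnd', ?_, ?_⟩
  · -- fof invariant
    intro f hf
    have hc := hcount f (by omega)
    show (pvFof2 fof old new).getD f 0 = ((cnt.insert c new).values.count f : Int)
    unfold pvFof2 pvFof1
    by_cases hfn : f = new <;> by_cases hfo : f = old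
    · exfalso; omega
    · subst hfn
      rw [if_pos (by omega : (0:Int) < f)]
      rw [PySem.Dict.getD_insert, if_pos rfl]
      split_ifs with ho
      · rw [PySem.Dict.getD_insert, if_neg hfo, hfof f hf]
        split_ifs at hc <;> omega
      · rw [hfof f hf]
        split_ifs at hc <;> omega
    · subst hfo
      by_cases h1 : 0 < new
      · rw [if_pos h1, PySem.Dict.getD_insert, if_neg hfn, if_pos hf,
            PySem.Dict.getD_insert, if_pos rfl, hfof f hf]
        split_ifs at hc <;> omega
      · rw [if_neg h1, if_pos hf, PySem.Dict.getD_insert, if_pos rfl, hfof f hf]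
        split_ifs at hc <;> omega
    · split_ifs with h1 h2 h3 <;>
        (try simp only [PySem.Dict.getD_insert, if_neg hfn, if_neg hfo]) <;>
        rw [hfof f hf] <;> split_ifs at hc <;> omega
  · -- distinct invariant
    show pvDist2 fof distinct old new = ((pvPos (cnt.insert c new)).toFinset.card : Int)
    have hT' : (pvPos (cnt.insert c new)).toFinset =
        (if 0 < new then
           insert new (if 0 < old ∧ (cnt.values.count old : Int) = 1
             then ((pvPos cnt).toFinset).erase old else (pvPos cnt).toFinset)
         else (if 0 < old ∧ (cnt.values.count old : Int) = 1
             then ((pvPos cnt).toFinset).erase old else (pvPos cnt).toFinset)) := by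
      ext f
      rw [hmem']
      have hfT : f ∈ (pvPos cnt).toFinset → 0 < f := fun h => ((pvMem_pos _ _).mp h).1
      by_cases hfo : f = old
      · subst hfo
        split_ifs with h1 h2 h3 <;>
          (try simp only [Finset.mem_insert, Finset.mem_erase]) <;> tauto
      · split_ifs with h1 h2 h3 <;>
          (try simp only [Finset.mem_insert, Finset.mem_erase]) <;> tauto
    have holdT : 0 < old ∧ (cnt.values.count old : Int) = 1 → old ∈ (pvPos cnt).toFinset := by
      intro h; exact (pvMem_pos _ _).mpr ⟨h.1, holdpos h.1⟩
    have hnewT : new ∈ (pvPos cnt).toFinset ↔ (0 < new ∧ 0 < cnt.values.count new) :=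
      pvMem_pos _ _
    rw [hT']
    unfold pvDist2 pvDist1 pvFof1
    by_cases h1 : 0 < new <;> by_cases h2 : 0 < old ∧ (cnt.values.count old : Int) = 1
    · -- slide can both remove old and add new
      rw [if_pos h1, if_pos h2, if_pos h2.1, PySem.Dict.getD_insert, if_neg hne,
          hfof new h1, hfof old h2.1]
      have hmemold := holdT h2
      have hpos : 0 < (pvPos cnt).toFinset.card := Finset.card_pos.mpr ⟨old, hmemold⟩
      have hcarde : ((pvPos cnt).toFinset.erase old).card = (pvPos cnt).toFinset.card - 1 :=
        Finset.card_erase_of_mem hmemold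
      by_cases h3 : cnt.values.count new = 0
      · have hnin : ¬ new ∈ (pvPos cnt).toFinset.erase old := by
          simp [Finset.mem_erase, hnewT, h3]
        rw [Finset.card_insert_of_notMem hnin, hcarde]
        rw [if_pos ⟨h1, by omega⟩, if_pos ⟨h2.1, by omega⟩]
        omega
      · have hin : new ∈ (pvPos cnt).toFinset.erase old :=
          Finset.mem_erase.mpr ⟨hne, hnewT.mpr ⟨h1, Nat.pos_of_ne_zero h3⟩⟩
        rw [Finset.insert_eq_self.mpr hin, hcarde]
        rw [if_neg (by omega : ¬ (0 < new ∧ (cnt.values.count new : Int) = 0)),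
            if_pos ⟨h2.1, by omega⟩]
        omega
    · -- add new, old stays
      rw [if_pos h1, if_neg h2]
      have hg : (if 0 < old then fof.insert old (fof.getD old 0 - 1) else fof).getD new 0
          = (cnt.values.count new : Int) := by
        split_ifs with ho
        · rw [PySem.Dict.getD_insert, if_neg hne, hfof new h1]
        · rw [hfof new h1]
      rw [hg]
      have hd1 : (if 0 < old ∧ fof.getD old 0 - 1 = 0 then distinct - 1 else distinct)
          = distinct := by
        split_ifs with ho
        · exfalso
          rw [hfof old ho.1] at ho
          exact h2 ⟨ho.1, by omega⟩
        · rfl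
      rw [hd1]
      by_cases h3 : cnt.values.count new = 0
      · have hnin : ¬ new ∈ (pvPos cnt).toFinset := by
          simp [hnewT, h3]
        rw [Finset.card_insert_of_notMem hnin]
        rw [if_pos ⟨h1, by omega⟩]
        omega
      · have hin : new ∈ (pvPos cnt).toFinset := hnewT.mpr ⟨h1, Nat.pos_of_ne_zero h3⟩
        rw [Finset.insert_eq_self.mpr hin]
        rw [if_neg (by omega : ¬ (0 < new ∧ (cnt.values.count new : Int) = 0))]
        omega
    · -- remove old, no new
      rw [if_neg h1, if_pos h2]
      have hmemold := holdT h2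
      have hpos : 0 < (pvPos cnt).toFinset.card := Finset.card_pos.mpr ⟨old, hmemold⟩
      have hcarde := Finset.card_erase_of_mem hmemold
      rw [if_neg (fun hx => h1 hx.1 :
        ¬ (0 < new ∧ (if 0 < old then fof.insert old (fof.getD old 0 - 1) else fof).getD new 0 = 0))]
      rw [if_pos ⟨h2.1, by rw [hfof old h2.1]; omega⟩]
      omega
    · -- nothing changes
      rw [if_neg h1, if_neg h2]
      rw [if_neg (fun hx => h1 hx.1 :
        ¬ (0 < new ∧ (if 0 < old then fof.insert old (fof.getD old 0 - 1) else fof).getD new 0 = 0))]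
      have hd1 : (if 0 < old ∧ fof.getD old 0 - 1 = 0 then distinct - 1 else distinct)
          = distinct := by
        split_ifs with ho
        · exfalso; rw [hfof old ho.1] at ho; exact h2 ⟨ho.1, by omega⟩
        · rfl
      rw [hd1]
      exact hdist

lemma pvInv_empty : pvInv (PySem.Dict.empty : PySem.Dict Char Int) PySem.Dict.empty 0 := by
  refine ⟨by simp [PySem.Dict.keys_empty], fun f hf => by simp [PySem.Dict.getD_empty], ?_⟩
  simp [pvPos, PySem.Dict.values, PySem.Dict.empty]

lemma pvLoop1 (cs : List Char) (L : List Int) :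
    ∀ (cnt : PySem.Dict Char Int) (fof : PySem.Dict Int Int) (distinct : Int),
    pvInv cnt fof distinct →
    (L.foldl (bStep1 cs) (cnt, fof, distinct)).1 = L.foldl (aStep1 cs) cnt ∧
    pvInv (L.foldl (bStep1 cs) (cnt, fof, distinct)).1
      (L.foldl (bStep1 cs) (cnt, fof, distinct)).2.1
      (L.foldl (bStep1 cs) (cnt, fof, distinct)).2.2 := by
  induction L with
  | nil => intro cnt fof distinct h; exact ⟨rfl, h⟩
  | cons i t ih =>
    intro cnt fof distinct h
    simp only [List.foldl_cons]
    have hs := pvShift_spec cnt fof distinct (PySem.List.pyGetD cs i ' ') 1 (Or.inl rfl) h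
    have hb : bStep1 cs (cnt, fof, distinct) i
        = ((pvShift cnt fof distinct (PySem.List.pyGetD cs i ' ') 1).1,
           (pvShift cnt fof distinct (PySem.List.pyGetD cs i ' ') 1).2.1,
           (pvShift cnt fof distinct (PySem.List.pyGetD cs i ' ') 1).2.2) := by
      simp [bStep1]
    have ha : aStep1 cs cnt i = (pvShift cnt fof distinct (PySem.List.pyGetD cs i ' ') 1).1 := by
      rw [hs.1]; rfl
    rw [hb, ha]
    exact ih _ _ _ hs.2

lemma pvLoop2 (cs : List Char) (lw : Int) (L : List Int) :
    ∀ (cnt : PySem.Dict Char Int) (fof : PySem.Dict Int Int) (distinct count : Int),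
    pvInv cnt fof distinct →
    (L.foldl (bStep2 cs lw) ((cnt, fof, distinct), count)).1.1
        = (L.foldl (aStep2 cs lw) (cnt, count)).1 ∧
    pvInv (L.foldl (bStep2 cs lw) ((cnt, fof, distinct), count)).1.1
      (L.foldl (bStep2 cs lw) ((cnt, fof, distinct), count)).1.2.1
      (L.foldl (bStep2 cs lw) ((cnt, fof, distinct), count)).1.2.2 ∧
    (L.foldl (bStep2 cs lw) ((cnt, fof, distinct), count)).2
        = (L.foldl (aStep2 cs lw) (cnt, count)).2 := by
  induction L with
  | nil => intro cnt fof distinct count h; exact ⟨rfl, h, rfl⟩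
  | cons i t ih =>
    intro cnt fof distinct count h
    simp only [List.foldl_cons]
    have hs1 := pvShift_spec cnt fof distinct (PySem.List.pyGetD cs (i - lw) ' ') (-1)
      (Or.inr rfl) h
    have hs2 := pvShift_spec (pvShift cnt fof distinct (PySem.List.pyGetD cs (i - lw) ' ') (-1)).1
      (pvShift cnt fof distinct (PySem.List.pyGetD cs (i - lw) ' ') (-1)).2.1
      (pvShift cnt fof distinct (PySem.List.pyGetD cs (i - lw) ' ') (-1)).2.2
      (PySem.List.pyGetD cs i ' ') 1 (Or.inl rfl) hs1.2
    have hd1 : (pvShift cnt fof distinct (PySem.List.pyGetD cs (i - lw) ' ') (-1)).1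
        = cnt.insert (PySem.List.pyGetD cs (i - lw) ' ')
            (cnt.getD (PySem.List.pyGetD cs (i - lw) ' ') 0 - 1) := by
      rw [hs1.1]
      have : cnt.getD (PySem.List.pyGetD cs (i - lw) ' ') 0 + (-1)
          = cnt.getD (PySem.List.pyGetD cs (i - lw) ' ') 0 - 1 := by omega
      rw [this]
    -- name the second shift result
    set Y := pvShift (pvShift cnt fof distinct (PySem.List.pyGetD cs (i - lw) ' ') (-1)).1
      (pvShift cnt fof distinct (PySem.List.pyGetD cs (i - lw) ' ') (-1)).2.1
      (pvShift cnt fof distinct (PySem.List.pyGetD cs (i - lw) ' ') (-1)).2.2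
      (PySem.List.pyGetD cs i ' ') 1 with hY
    have hd2 : Y.1 = (aStep2 cs lw (cnt, count) i).1 := by
      show Y.1 = _
      rw [hY, hs2.1, hd1]; rfl
    have hb : bStep2 cs lw ((cnt, fof, distinct), count) i
        = ((Y.1, Y.2.1, Y.2.2), if Y.2.2 = 1 then count + 1 else count) := by
      simp [bStep2, hY]
    have hcnt : (aStep2 cs lw (cnt, count) i).2
        = (if Y.2.2 = 1 then count + 1 else count) := by
      show (if checkOrteganol (aStep2 cs lw (cnt, count) i).1 then count + 1 else count) = _
      rw [← hd2, pvCheck_eq, ← hs2.2.2.2]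
      by_cases hy : Y.2.2 = 1 <;> simp [hy]
    have ha : aStep2 cs lw (cnt, count) i
        = ((aStep2 cs lw (cnt, count) i).1, if Y.2.2 = 1 then count + 1 else count) := by
      rw [← hcnt]
    rw [hb, ha, hd2]
    exact ih _ _ _ _ (hd2 ▸ hs2.2)

theorem solve_eq (N A B : Int) (S : String) : solve N A B S = solve_alt N A B S := by
  unfold solve solve_alt
  refine PySem.List.foldl_congr_mem _ _ _ _ ?_
  intro count lw _
  show ((PySem.List.pyRange lw N).foldl (aStep2 S.toList lw)
      ((PySem.List.pyRange 0 lw).foldl (aStep1 S.toList) PySem.Dict.empty,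
       if checkOrteganol ((PySem.List.pyRange 0 lw).foldl (aStep1 S.toList) PySem.Dict.empty)
         then count + 1 else count)).2
    = ((PySem.List.pyRange lw N).foldl (bStep2 S.toList lw)
      ((PySem.List.pyRange 0 lw).foldl (bStep1 S.toList) (PySem.Dict.empty, PySem.Dict.empty, 0),
       if ((PySem.List.pyRange 0 lw).foldl (bStep1 S.toList)
           (PySem.Dict.empty, PySem.Dict.empty, 0)).2.2 = 1 then count + 1 else count)).2
  set st := (PySem.List.pyRange 0 lw).foldl (bStep1 S.toList)
    (PySem.Dict.empty, PySem.Dict.empty, 0) with hst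
  have h1 := pvLoop1 S.toList (PySem.List.pyRange 0 lw) PySem.Dict.empty PySem.Dict.empty 0
    pvInv_empty
  rw [← hst] at h1
  have hcchk : (if checkOrteganol ((PySem.List.pyRange 0 lw).foldl (aStep1 S.toList)
      PySem.Dict.empty) then count + 1 else count) = (if st.2.2 = 1 then count + 1 else count) := by
    rw [← h1.1, pvCheck_eq, ← h1.2.2.2]
    by_cases hy : st.2.2 = 1 <;> simp [hy]
  rw [hcchk, ← h1.1]
  have h2 := pvLoop2 S.toList lw (PySem.List.pyRange lw N) st.1 st.2.1 st.2.2
    (if st.2.2 = 1 then count + 1 else count) h1.2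
  have heta : ((st.1, st.2.1, st.2.2) : PySem.Dict Char Int × PySem.Dict Int Int × Int) = st := by
    simp
  rw [heta] at h2
  exact h2.2.2.symm

-- ===== VERDICT (by name: the statement is the Claim_ definition above) =====
theorem solve_spec : Claim_equal_solve := by
  intro N A B S _ _
  exact solve_eq N A B S
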